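-- pv_equiv track=rewrite | github.com/j3ang/VandyHack2018-vanderbilt-university | PythonScripts/VandyHack/DataCollection/Categories/test_classifier.py | token_feature
-- ===== SOURCE A (Python) =====
-- from collections import Counter
-- from itertools import chain, combinations
--
-- def token_feature(doc_tokens, k=3):
--     c = Counter(doc_tokens)
--     feats = {}
--     for token in doc_tokens:
--         feats['has(%s)'%(token)] = c[token]
--
--     for i in range(0, len(doc_tokens) - k + 1):
--         a = doc_tokens[i : i + k]
--         for co in combinations(a,2):
--             key = 'token_pair=%s__%s' % (co[0],co[1])
--             if key in feats:
--                 feats[key] = feats[key] + 1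
--             else:
--                 feats[key] = 1
--
--     return feats
-- ===== SOURCE B (Python) =====
-- from collections import Counter
--
--
-- def token_feature(doc_tokens, k=3):
--     n = len(doc_tokens)
--     c = Counter(doc_tokens)
--     feats = {}
--     for token in doc_tokens:
--         feats['has(%s)' % (token)] = c[token]
--
--     if 2 <= k <= n:
--         def add(p, q):
--             # number of length-k windows containing both positions p and q
--             m = min(p, n - k) - max(0, q - k + 1) + 1
--             key = 'token_pair=%s__%s' % (doc_tokens[p], doc_tokens[q])
--             feats[key] = feats.get(key, 0) + m
--         # pairs first seen in window 0: all close pairs inside it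
--         for p in range(k - 1):
--             for q in range(p + 1, k):
--                 add(p, q)
--         # window i (i >= 1) first introduces the pairs ending at its last slot
--         for i in range(1, n - k + 1):
--             for p in range(i, i + k - 1):
--                 add(p, i + k - 1)
--     return feats
-- ===== Notes on version B (the rewrite author's own statement) =====
-- stated objective: alternative
-- what changed: Instead of re-enumerating every pair inside every sliding window (combinations per window), B visits each close position pair once - window 0 contributes all its pairs, each later window only the pairs ending at its last slot - and adds that pair's total window multiplicity in closed form (min(p,n-k)-max(0,q-k+1)+1), removing the per-window duplicate pair work (O(n*k) pair visits instead of O(n*k^2)); intended as faster, one a timing run measured 6-58x, another could not confirm it.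
-- intended difference: For k < 0 with len(doc_tokens)+k >= 2, A's slice doc_tokens[i:i+k] wraps through Python negative indexing and accidentally emits pair features for windows of size n+k; B treats a non-positive window size as yielding no pairs and returns only the has(token) features, the intended reading of a window-size parameter. — e.g. on token_feature(["a", "b", "c"], -1): A returns [("has(a)", 1), ("has(b)", 1), ("has(c)", 1), ("token_pair=a__b", 1)], B returns [("has(a)", 1), ("has(b)", 1), ("has(c)", 1)]
import Mathlib
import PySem

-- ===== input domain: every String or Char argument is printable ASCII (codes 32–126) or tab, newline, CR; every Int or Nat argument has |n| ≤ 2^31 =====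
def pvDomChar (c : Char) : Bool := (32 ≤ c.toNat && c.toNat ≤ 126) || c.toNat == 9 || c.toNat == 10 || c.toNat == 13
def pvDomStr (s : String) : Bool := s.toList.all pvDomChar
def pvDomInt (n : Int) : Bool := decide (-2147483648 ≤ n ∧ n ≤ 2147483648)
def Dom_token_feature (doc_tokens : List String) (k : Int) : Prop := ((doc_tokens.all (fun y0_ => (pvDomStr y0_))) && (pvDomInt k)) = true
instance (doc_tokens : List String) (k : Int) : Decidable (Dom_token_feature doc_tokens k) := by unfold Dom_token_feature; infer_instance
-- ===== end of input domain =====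

-- B re-implements A's windowed token-pair counting by visiting each close position pair
-- once with its window multiplicity in closed form (alternative decomposition; for k < 0 it
-- returns the intended 'no pair features' instead of A's negative-index slicing accident).
-- ===== PORT A =====
-- Port note: combinations(a,2) always yields 2-lists, so co[0]/co[1] are in range and
-- PySem.List.pyGetD co 0 "" / pyGetD co 1 "" are exact; likewise doc_tokens[p] in B with p in range.
def token_feature (doc_tokens : List String) (k : Int) : List (String × Int) :=
  let c : PySem.Dict String Int := PySem.Dict.counter doc_tokens
  let feats : PySem.Dict String Int :=
    doc_tokens.foldl (fun d token => d.insert ("has(" ++ token ++ ")") (c.getD token 0)) PySem.Dict.empty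
  let feats :=
    (PySem.List.pyRange 0 ((doc_tokens.length : Int) - k + 1) 1).foldl (fun d i =>
      let a := PySem.List.slice doc_tokens (some i) (some (i + k))
      (PySem.List.combinations a 2).foldl (fun d co =>
        let key := "token_pair=" ++ PySem.List.pyGetD co 0 "" ++ "__" ++ PySem.List.pyGetD co 1 ""
        if d.contains key then d.insert key (d.getD key 0 + 1) else d.insert key 1) d) feats
  feats.items

-- ===== PORT B =====
def token_feature_alt (doc_tokens : List String) (k : Int) : List (String × Int) :=
  let n : Int := doc_tokens.length
  let c : PySem.Dict String Int := PySem.Dict.counter doc_tokens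
  let feats : PySem.Dict String Int :=
    doc_tokens.foldl (fun d token => d.insert ("has(" ++ token ++ ")") (c.getD token 0)) PySem.Dict.empty
  let feats :=
    if 2 ≤ k ∧ k ≤ n then
      let add := fun (d : PySem.Dict String Int) (p q : Int) =>
        let m := min p (n - k) - max 0 (q - k + 1) + 1
        let key := "token_pair=" ++ PySem.List.pyGetD doc_tokens p "" ++ "__" ++ PySem.List.pyGetD doc_tokens q ""
        d.insert key (d.getD key 0 + m)
      let feats := (PySem.List.pyRange 0 (k - 1) 1).foldl (fun d p =>
          (PySem.List.pyRange (p + 1) k 1).foldl (fun d q => add d p q) d) feats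
      (PySem.List.pyRange 1 (n - k + 1) 1).foldl (fun d i =>
          (PySem.List.pyRange i (i + k - 1) 1).foldl (fun d p => add d p (i + k - 1)) d) feats
    else feats
  feats.items

-- ===== PRECONDITION & SPEC =====
-- For k < 0 with len(doc_tokens)+k >= 2, A's slice doc_tokens[i:i+k] wraps through Python
-- negative indexing and accidentally emits pair features for windows of size n+k; B treats a
-- non-positive window size as yielding no pairs and returns only the has(token) features,
-- the intended reading of a window-size parameter.
def D_token_feature (doc_tokens : List String) (k : Int) : Prop :=
  k < 0 ∧ 2 ≤ (doc_tokens.length : Int) + k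
instance (doc_tokens : List String) (k : Int) : Decidable (D_token_feature doc_tokens k) := by
  unfold D_token_feature; infer_instance
def Spec_token_feature (doc_tokens : List String) (k : Int) (out : List (String × Int)) : Prop :=
  ¬ D_token_feature doc_tokens k → out = token_feature_alt doc_tokens k
instance (doc_tokens : List String) (k : Int) (out : List (String × Int)) : Decidable (Spec_token_feature doc_tokens k out) := by
  unfold Spec_token_feature; infer_instance
def pvDiffWitness_token_feature : List String × Int := (["a", "b", "c"], -1)
def pvDiffWitnessOut_token_feature : (List (String × Int)) × (List (String × Int)) :=
  ([("has(a)", 1), ("has(b)", 1), ("has(c)", 1), ("token_pair=a__b", 1)],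
   [("has(a)", 1), ("has(b)", 1), ("has(c)", 1)])

-- ===== CLAIM (what is proved, stated in full; the proofs are below) =====
def Claim_unchanged_token_feature : Prop := ∀ (doc_tokens : List String) (k : Int), Dom_token_feature doc_tokens k → Spec_token_feature doc_tokens k (token_feature doc_tokens k)
def Claim_changed_token_feature : Prop := Dom_token_feature (pvDiffWitness_token_feature.1) (pvDiffWitness_token_feature.2) ∧ D_token_feature (pvDiffWitness_token_feature.1) (pvDiffWitness_token_feature.2) ∧ token_feature (pvDiffWitness_token_feature.1) (pvDiffWitness_token_feature.2) = pvDiffWitnessOut_token_feature.1 ∧ token_feature_alt (pvDiffWitness_token_feature.1) (pvDiffWitness_token_feature.2) = pvDiffWitnessOut_token_feature.2 ∧ pvDiffWitnessOut_token_feature.1 ≠ pvDiffWitnessOut_token_feature.2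
def Claim_exact_token_feature : Prop := ∀ (doc_tokens : List String) (k : Int), Dom_token_feature doc_tokens k → D_token_feature doc_tokens k → token_feature doc_tokens k ≠ token_feature_alt doc_tokens k

-- ===== LEMMAS AND PROOFS =====

def pairs2 {α : Type} : List α → List (α × α)
  | [] => []
  | x :: xs => (xs.map (fun y => (x, y))) ++ pairs2 xs

def tokI (xs : List String) (j : Int) : String := PySem.List.pyGetD xs j ""

def keyPI (xs : List String) (pq : Int × Int) : String :=
  "token_pair=" ++ tokI xs pq.1 ++ "__" ++ tokI xs pq.2

def mvalI (n k : Int) (pq : Int × Int) : Int :=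
  min pq.1 (n - k) - max 0 (pq.2 - k + 1) + 1

def PAs (n k : Int) : List (Int × Int) :=
  (PySem.List.pyRange 0 (n - k + 1) 1).flatMap (fun i => pairs2 (PySem.List.pyRange i (i + k) 1))

def SBs (n k : Int) : List (Int × Int) :=
  pairs2 (PySem.List.pyRange 0 k 1) ++
    (PySem.List.pyRange 1 (n - k + 1) 1).flatMap
      (fun i => (PySem.List.pyRange i (i + k - 1) 1).map (fun p => (p, i + k - 1)))

-- generic loop-shape lemma: a fold of folds is a fold over the flatMap
theorem foldl_foldl_flatMap {α β δ : Type} (l : List α) (g : α → List β)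
    (f : δ → β → δ) (init : δ) :
    l.foldl (fun d i => (g i).foldl f d) init = (l.flatMap g).foldl f init := by
  induction l generalizing init with
  | nil => simp
  | cons a t ih => simp [List.flatMap_cons, List.foldl_append, ih]

-- weighted-counter fold: value at v is the initial value plus the total weight of v's entries
theorem getD_wfold {γ : Type} (l : List γ) (f : γ → String) (w : γ → Int)
    (d : PySem.Dict String Int) (v : String) :
    (l.foldl (fun d x => d.insert (f x) (d.getD (f x) 0 + w x)) d).getD v 0
      = d.getD v 0 + ((l.filter (fun x => decide (f x = v))).map w).sum := by
  induction l generalizing d with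
  | nil => simp
  | cons a t ih =>
    simp only [List.foldl_cons, ih, List.filter_cons]
    by_cases h : f a = v
    · simp [h]; ring
    · simp [h, PySem.Dict.getD_insert, Ne.symm h]

-- countP of a flatMap is the sum of the member counts
theorem countP_flatMap {α β : Type} (l : List α) (g : α → List β) (p : β → Bool) :
    (l.flatMap g).countP p = (l.map (fun a => (g a).countP p)).sum := by
  induction l with
  | nil => simp
  | cons a t ih => simp [List.flatMap_cons, List.countP_append, ih]

theorem cast_sum_nat (l : List Nat) : ((l.sum : Nat) : Int) = (l.map (fun x : Nat => (x : Int))).sum := by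
  induction l with
  | nil => simp
  | cons a t ih => simp [ih]

-- combinations l 2 is the pair list, in CPython's order
theorem combinations_two {α : Type} (l : List α) :
    PySem.List.combinations l 2 = (pairs2 l).map (fun pq => [pq.1, pq.2]) := by
  induction l with
  | nil => simp [PySem.List.combinations_nil_succ, pairs2]
  | cons x xs ih =>
    rw [show (2 : Nat) = 1 + 1 from rfl] at *
    rw [PySem.List.combinations_cons_succ, PySem.List.combinations_one, ih]
    simp [pairs2, List.map_map, Function.comp]

theorem mem_pairs2_pyRange (a b : Int) (pq : Int × Int) :
    pq ∈ pairs2 (PySem.List.pyRange a b 1) ↔ a ≤ pq.1 ∧ pq.1 < pq.2 ∧ pq.2 < b := by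
  by_cases hab : a < b
  · rw [PySem.List.pyRange_one_cons hab]
    have ih := mem_pairs2_pyRange (a + 1) b pq
    simp only [pairs2, List.mem_append, List.mem_map, ih, PySem.List.mem_pyRange_one]
    constructor
    · rintro (⟨y, hy, rfl⟩ | h) <;> simp_all <;> omega
    · rintro ⟨h1, h2, h3⟩
      rcases eq_or_lt_of_le h1 with heq | hlt
      · exact Or.inl ⟨pq.2, by omega, by rw [heq]⟩
      · exact Or.inr ⟨by omega, h2, h3⟩
  · rw [PySem.List.pyRange_one_eq_nil (by omega)]
    simp [pairs2]; omega
termination_by (b - a).toNat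
decreasing_by omega

theorem nodup_pairs2_pyRange (a b : Int) : (pairs2 (PySem.List.pyRange a b 1)).Nodup := by
  by_cases hab : a < b
  · rw [PySem.List.pyRange_one_cons hab]
    have ih := nodup_pairs2_pyRange (a + 1) b
    simp only [pairs2]
    refine List.Nodup.append ?_ ih ?_
    · exact (PySem.List.nodup_pyRange_one _ _).map (fun x y h => by simpa using congrArg Prod.snd h)
    · intro pq hm hm2
      rcases List.mem_map.1 hm with ⟨y, _, rfl⟩
      have := (mem_pairs2_pyRange (a + 1) b _).1 hm2
      omega
  · rw [PySem.List.pyRange_one_eq_nil (by omega)]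
    simp [pairs2]
termination_by (b - a).toNat
decreasing_by omega

theorem count_pairs2_pyRange (a b : Int) (pq : Int × Int) :
    (pairs2 (PySem.List.pyRange a b 1)).count pq
      = if a ≤ pq.1 ∧ pq.1 < pq.2 ∧ pq.2 < b then 1 else 0 := by
  by_cases h : a ≤ pq.1 ∧ pq.1 < pq.2 ∧ pq.2 < b
  · rw [if_pos h, List.Nodup.count (nodup_pairs2_pyRange a b),
      if_pos ((mem_pairs2_pyRange a b pq).2 h)]
  · rw [if_neg h, List.count_eq_zero]
    intro hm; exact h ((mem_pairs2_pyRange a b pq).1 hm)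

-- pairs of the window [a, a+k) that end at its last slot, in stream order
theorem filter_top_pairs2 (a k : Int) (hk : 1 ≤ k) :
    (pairs2 (PySem.List.pyRange a (a + k) 1)).filter (fun pq => decide (pq.2 = a + k - 1))
      = (PySem.List.pyRange a (a + k - 1) 1).map (fun p => (p, a + k - 1)) := by
  by_cases hk2 : 2 ≤ k
  · rw [PySem.List.pyRange_one_cons (by omega)]
    simp only [pairs2, List.filter_append, List.filter_map]
    have htail := filter_top_pairs2 (a + 1) (k - 1) (by omega)
    have harr : a + 1 + (k - 1) = a + k := by ring
    rw [harr] at htail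
    rw [htail]
    have hfil : (PySem.List.pyRange (a + 1) (a + k) 1).filter
        ((fun pq => decide (pq.2 = a + k - 1)) ∘ (fun y => (a, y))) = [a + k - 1] := by
      have : ((fun pq => decide (pq.2 = a + k - 1)) ∘ (fun y : Int => (a, y)))
          = (fun y => y == a + k - 1) := by
        funext y; simp [Function.comp]; rfl
      rw [this, List.filter_beq, List.Nodup.count (PySem.List.nodup_pyRange_one _ _),
        if_pos (by rw [PySem.List.mem_pyRange_one]; omega)]
      simp
    rw [hfil]
    rw [PySem.List.pyRange_one_cons (show a < a + k - 1 by omega)]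
    simp
  · have hk1 : k = 1 := by omega
    subst hk1
    rw [PySem.List.pyRange_one_singleton, show a + 1 - 1 = a by ring,
      PySem.List.pyRange_one_eq_nil (by omega)]
    simp [pairs2]
termination_by k.toNat
decreasing_by omega

-- the number of windows [i, i+kk) among [0,m) that contain the pair (p, q), in closed form
theorem sum_window_ite (p q kk : Int) : ∀ (m : Nat),
    ((PySem.List.pyRange 0 (m : Int) 1).map
        (fun i => if i ≤ p ∧ p < q ∧ q < i + kk then (1 : Int) else 0)).sum
      = if p < q then max 0 (min p ((m : Int) - 1) - max 0 (q - kk + 1) + 1) else 0 := by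
  intro m
  induction m with
  | zero =>
    rw [show ((0:Nat):Int) = 0 by norm_num, PySem.List.pyRange_one_eq_nil (by omega)]
    simp only [List.map_nil, List.sum_nil]
    split_ifs <;> omega
  | succ m ih =>
    rw [show ((m+1:Nat):Int) = (m:Int) + 1 by push_cast; ring,
      PySem.List.pyRange_one_succ_right (by positivity)]
    rw [List.map_append, List.sum_append, ih]
    simp only [List.map_cons, List.map_nil, List.sum_cons, List.sum_nil]
    split_ifs <;> omega

theorem mem_PAs (n k : Int) (pq : Int × Int) :
    pq ∈ PAs n k ↔ ∃ i : Int, 0 ≤ i ∧ i ≤ n - k ∧ i ≤ pq.1 ∧ pq.1 < pq.2 ∧ pq.2 < i + k := by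
  simp only [PAs, List.mem_flatMap, PySem.List.mem_pyRange_one, mem_pairs2_pyRange]
  constructor
  · rintro ⟨i, ⟨h1, h2⟩, h3, h4, h5⟩; exact ⟨i, h1, by omega, h3, h4, h5⟩
  · rintro ⟨i, h1, h2, h3, h4, h5⟩; exact ⟨i, ⟨h1, by omega⟩, h3, h4, h5⟩

-- P2: each close pair's total window multiplicity, in closed form
theorem cast_sum_ite (l : List Int) (c : Int → Prop) [DecidablePred c] :
    (((l.map (fun i => if c i then (1 : Nat) else 0)).sum : Nat) : Int)
      = (l.map (fun i => if c i then (1 : Int) else 0)).sum := by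
  induction l with
  | nil => simp
  | cons a t ih =>
    simp only [List.map_cons, List.sum_cons, Nat.cast_add, ih]
    split_ifs <;> simp

theorem count_PAs (n k : Int) (hk2 : 2 ≤ k) (hkn : k ≤ n) (pq : Int × Int)
    (hm : pq ∈ PAs n k) :
    ((PAs n k).count pq : Int) = mvalI n k pq := by
  obtain ⟨i, hi0, hin, hip, hpq, hqk⟩ := (mem_PAs n k pq).1 hm
  have hcount : (PAs n k).count pq
      = ((PySem.List.pyRange 0 (n - k + 1) 1).map
          (fun i => (pairs2 (PySem.List.pyRange i (i + k) 1)).count pq)).sum := by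
    rw [List.count, PAs, countP_flatMap]
  have h2 : ((PySem.List.pyRange 0 (n - k + 1) 1).map
          (fun i => (pairs2 (PySem.List.pyRange i (i + k) 1)).count pq))
      = ((PySem.List.pyRange 0 (n - k + 1) 1).map
          (fun i => if i ≤ pq.1 ∧ pq.1 < pq.2 ∧ pq.2 < i + k then (1 : Nat) else 0)) := by
    apply List.map_congr_left
    intro x _
    rw [count_pairs2_pyRange]
  rw [hcount, h2, cast_sum_ite _ (fun i => i ≤ pq.1 ∧ pq.1 < pq.2 ∧ pq.2 < i + k)]
  have hcast : (n - k + 1) = (((n - k + 1).toNat : Nat) : Int) := by omega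
  rw [hcast, sum_window_ite pq.1 pq.2 k ((n - k + 1).toNat)]
  rw [if_pos hpq]
  unfold mvalI
  omega

-- P1: first occurrences of A's pair stream are window 0's pairs, then each
-- later window's pairs ending at its last slot
theorem ofList_windows (k : Int) (hk : 2 ≤ k) : ∀ (j : Nat),
    PySem.Set.ofList ((PySem.List.pyRange 0 (1 + (j : Int)) 1).flatMap
        (fun i => pairs2 (PySem.List.pyRange i (i + k) 1)))
      = pairs2 (PySem.List.pyRange 0 k 1) ++
        (PySem.List.pyRange 1 (1 + (j : Int)) 1).flatMap
          (fun i => (PySem.List.pyRange i (i + k - 1) 1).map (fun p => (p, i + k - 1))) := by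
  intro j
  induction j with
  | zero =>
    rw [show (1 + ((0:Nat) : Int)) = 0 + 1 by norm_num, PySem.List.pyRange_one_singleton,
      PySem.List.pyRange_one_eq_nil (a := 1) (b := 0 + 1) (by norm_num)]
    simp only [List.flatMap_cons, List.flatMap_nil, List.append_nil, zero_add]
    exact PySem.Set.ofList_eq_self_of_nodup _ (nodup_pairs2_pyRange 0 k)
  | succ j ih =>
    have hsplit : (1 + ((j + 1 : Nat) : Int)) = (1 + (j : Int)) + 1 := by push_cast; ring
    rw [hsplit, PySem.List.pyRange_one_succ_right (by positivity),
      PySem.List.pyRange_one_succ_right (by omega),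
      List.flatMap_append, List.flatMap_append, PySem.Set.ofList_append, ih,
      PySem.Set.update_eq_append_filter, List.append_assoc]
    congr 1
    congr 1
    simp only [List.flatMap_cons, List.flatMap_nil, List.append_nil]
    set c := 1 + (j : Int) with hc
    rw [PySem.Set.ofList_eq_self_of_nodup _ (nodup_pairs2_pyRange c (c + k))]
    have hfc : (pairs2 (PySem.List.pyRange c (c + k) 1)).filter
          (fun y => !(PySem.Set.contains (pairs2 (PySem.List.pyRange 0 k 1) ++
            (PySem.List.pyRange 1 c 1).flatMap
              (fun i => (PySem.List.pyRange i (i + k - 1) 1).map (fun p => (p, i + k - 1)))) y))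
        = (pairs2 (PySem.List.pyRange c (c + k) 1)).filter (fun pq => decide (pq.2 = c + k - 1)) := by
      apply List.filter_congr
      intro pq hpq
      have hb := (mem_pairs2_pyRange c (c + k) pq).1 hpq
      -- pq is in an earlier window iff pq.2 < c + k - 1
      have hmem : (pq ∈ pairs2 (PySem.List.pyRange 0 k 1) ++
            (PySem.List.pyRange 1 c 1).flatMap
              (fun i => (PySem.List.pyRange i (i + k - 1) 1).map (fun p => (p, i + k - 1))))
          ↔ pq.2 < c + k - 1 := by
        rw [List.mem_append, mem_pairs2_pyRange]
        simp only [List.mem_flatMap, PySem.List.mem_pyRange_one, List.mem_map]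
        constructor
        · rintro (⟨h1, h2, h3⟩ | ⟨i, ⟨hi1, hi2⟩, p, hp, hpe⟩)
          · omega
          · have h2 : pq.2 = i + k - 1 := by rw [← hpe]
            have h1 : pq.1 = p := by rw [← hpe]
            omega
        · intro hlt
          by_cases hz : pq.2 ≤ k - 1
          · exact Or.inl ⟨by omega, by omega, by omega⟩
          · exact Or.inr ⟨pq.2 - k + 1, ⟨by omega, by omega⟩, pq.1, by omega,
              by rw [show pq.2 - k + 1 + k - 1 = pq.2 by ring]⟩
      rw [show (PySem.Set.contains (pairs2 (PySem.List.pyRange 0 k 1) ++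
            (PySem.List.pyRange 1 c 1).flatMap
              (fun i => (PySem.List.pyRange i (i + k - 1) 1).map (fun p => (p, i + k - 1)))) pq)
          = decide (pq.2 < c + k - 1) from by
        rw [PySem.Set.contains_eq_listContains, List.contains_eq_mem,
          decide_eq_decide.2 hmem]]
      by_cases hd : pq.2 < c + k - 1 <;> simp [hd] <;> omega
    rw [hfc, filter_top_pairs2 c k (by omega)]

-- sum of an equality indicator over a nodup list is a membership test
theorem sum_indicator_nodup {α : Type} [BEq α] [LawfulBEq α] [DecidableEq α] (s : List α) (p : α → Bool) (a : α)
    (hs : s.Nodup) :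
    ((s.filter p).map (fun x => if a = x then (1 : Nat) else 0)).sum
      = if a ∈ s ∧ p a then 1 else 0 := by
  induction s with
  | nil => simp
  | cons x t ih =>
    have hnd := (List.nodup_cons.1 hs)
    rw [List.filter_cons]
    by_cases hpx : p x
    · simp only [hpx, if_pos, List.map_cons, List.sum_cons]
      rw [ih hnd.2]
      by_cases hax : a = x
      · subst hax
        simp [hnd.1, hpx]
      · simp [hax, List.mem_cons]
    · simp only [Bool.not_eq_true] at hpx
      simp only [hpx, Bool.false_eq_true, if_false]
      rw [ih hnd.2]
      by_cases hax : a = x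
      · subst hax; simp [hpx]
      · simp [List.mem_cons, hax]
  
-- countP of l as a weighted sum over a nodup superset of its elements
theorem countP_eq_sum_counts {α : Type} [BEq α] [LawfulBEq α] [DecidableEq α] (l : List α) (s : List α) (p : α → Bool)
    (hs : s.Nodup) (hsub : ∀ x ∈ l, x ∈ s) :
    l.countP p = ((s.filter p).map (fun x => l.count x)).sum := by
  induction l with
  | nil => simp
  | cons a t ih =>
    have hsub' : ∀ x ∈ t, x ∈ s := fun x hx => hsub x (List.mem_cons_of_mem a hx)
    rw [List.countP_cons]
    have hmapeq : ((s.filter p).map (fun x => (a :: t).count x))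
        = (s.filter p).map (fun x => t.count x + if a = x then 1 else 0) := by
      apply List.map_congr_left; intro x _
      rw [List.count_cons]
      congr 1
      by_cases h : x = a <;> simp [h]
    rw [hmapeq]
    have hsplit : ((s.filter p).map (fun x => t.count x + if a = x then 1 else 0)).sum
        = ((s.filter p).map (fun x => t.count x)).sum
          + ((s.filter p).map (fun x => if a = x then (1:Nat) else 0)).sum := by
      induction (s.filter p) with
      | nil => simp
      | cons y u ihu => simp [ihu]; omega
    rw [hsplit, ih hsub', sum_indicator_nodup s p a hs]
    by_cases hpa : p a
    · have has : a ∈ s := hsub a (by simp)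
      simp [hpa, has]
    · simp [hpa]

theorem drop_take_eq_map_range (xs : List String) (a m : Nat) (h : a + m ≤ xs.length) :
    (xs.drop a).take m = (List.range m).map (fun t => xs.getD (a + t) "") := by
  apply List.ext_getElem
  · simp; omega
  · intro j h1 h2
    simp only [List.getElem_take, List.getElem_drop, List.getElem_map, List.getElem_range]
    rw [List.getD_eq_getElem xs "" (by simp at h1; omega)]

theorem slice_eq_map_pyRange (xs : List String) (i k : Int) (h0 : 0 ≤ i) (hk : 0 ≤ k)
    (hik : i + k ≤ (xs.length : Int)) :
    PySem.List.slice xs (some i) (some (i + k)) = (PySem.List.pyRange i (i + k) 1).map (tokI xs) := by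
  rw [PySem.List.slice_toNat xs h0 (by omega), PySem.List.pyRange_one, List.map_map]
  rw [drop_take_eq_map_range xs i.toNat ((i + k).toNat - i.toNat) (by omega)]
  rw [show (i + k - i) = k by ring, show (i + k).toNat - i.toNat = k.toNat by omega]
  apply List.map_congr_left
  intro t ht
  simp only [List.mem_range] at ht
  simp only [Function.comp, tokI]
  rw [show (i + (t : Int)) = ((i.toNat + t : Nat) : Int) by omega, PySem.List.pyGetD_natCast]

theorem flat_pairs (b a : Int) :
    (PySem.List.pyRange a (b - 1) 1).flatMap (fun p => (PySem.List.pyRange (p + 1) b 1).map (fun q => (p, q)))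
      = pairs2 (PySem.List.pyRange a b 1) := by
  by_cases hab : a < b - 1
  · rw [PySem.List.pyRange_one_cons hab, PySem.List.pyRange_one_cons (show a < b by omega)]
    simp only [List.flatMap_cons, pairs2]
    rw [flat_pairs b (a + 1)]
  · by_cases hab2 : a < b
    · rw [PySem.List.pyRange_one_eq_nil (show b - 1 ≤ a by omega),
        PySem.List.pyRange_one_cons hab2,
        PySem.List.pyRange_one_eq_nil (show b ≤ a + 1 by omega)]
      simp [pairs2]
    · rw [PySem.List.pyRange_one_eq_nil (show b - 1 ≤ a by omega),
        PySem.List.pyRange_one_eq_nil (show b ≤ a by omega)]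
      simp [pairs2]
termination_by (b - a).toNat
decreasing_by omega

theorem ofList_map_ofList {α β : Type} [BEq α] [LawfulBEq α] [BEq β] [LawfulBEq β] (l : List α) (f : α → β) :
    PySem.Set.ofList (l.map f) = PySem.Set.ofList ((PySem.Set.ofList l).map f) := by
  induction l using List.reverseRecOn with
  | nil => simp
  | append_singleton l' x ih =>
    rw [List.map_append, List.map_cons, List.map_nil,
      PySem.Set.ofList_append_singleton, PySem.Set.ofList_append_singleton, ih]
    by_cases hx : x ∈ PySem.Set.ofList l'
    · rw [PySem.Set.add_of_mem hx]
      have hfx : f x ∈ PySem.Set.ofList ((PySem.Set.ofList l').map f) := by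
        rw [PySem.Set.mem_ofList]
        exact List.mem_map_of_mem hx
      rw [PySem.Set.add_of_mem hfx]
    · rw [PySem.Set.add_of_not_mem hx, List.map_append, List.map_cons, List.map_nil,
        PySem.Set.ofList_append_singleton]

-- the shared first phase: the has(token) features
def hasFold (xs : List String) : PySem.Dict String Int :=
  xs.foldl (fun d token => d.insert ("has(" ++ token ++ ")")
    ((PySem.Dict.counter xs).getD token 0)) PySem.Dict.empty

theorem token_feature_eq (xs : List String) (k : Int) :
    token_feature xs k =
      ((PySem.List.pyRange 0 ((xs.length : Int) - k + 1) 1).foldl (fun d i =>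
        (PySem.List.combinations (PySem.List.slice xs (some i) (some (i + k))) 2).foldl
          (fun d co =>
            if d.contains ("token_pair=" ++ PySem.List.pyGetD co 0 "" ++ "__" ++ PySem.List.pyGetD co 1 "") then
              d.insert ("token_pair=" ++ PySem.List.pyGetD co 0 "" ++ "__" ++ PySem.List.pyGetD co 1 "")
                (d.getD ("token_pair=" ++ PySem.List.pyGetD co 0 "" ++ "__" ++ PySem.List.pyGetD co 1 "") 0 + 1)
            else
              d.insert ("token_pair=" ++ PySem.List.pyGetD co 0 "" ++ "__" ++ PySem.List.pyGetD co 1 "") 1) d)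
        (hasFold xs)).items := rfl

theorem token_feature_alt_eq (xs : List String) (k : Int) :
    token_feature_alt xs k =
      (if 2 ≤ k ∧ k ≤ (xs.length : Int) then
        (PySem.List.pyRange 1 ((xs.length : Int) - k + 1) 1).foldl (fun d i =>
            (PySem.List.pyRange i (i + k - 1) 1).foldl (fun d p =>
              d.insert ("token_pair=" ++ PySem.List.pyGetD xs p "" ++ "__" ++ PySem.List.pyGetD xs (i + k - 1) "")
                (d.getD ("token_pair=" ++ PySem.List.pyGetD xs p "" ++ "__" ++ PySem.List.pyGetD xs (i + k - 1) "") 0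
                  + (min p ((xs.length : Int) - k) - max 0 ((i + k - 1) - k + 1) + 1))) d)
          ((PySem.List.pyRange 0 (k - 1) 1).foldl (fun d p =>
            (PySem.List.pyRange (p + 1) k 1).foldl (fun d q =>
              d.insert ("token_pair=" ++ PySem.List.pyGetD xs p "" ++ "__" ++ PySem.List.pyGetD xs q "")
                (d.getD ("token_pair=" ++ PySem.List.pyGetD xs p "" ++ "__" ++ PySem.List.pyGetD xs q "") 0
                  + (min p ((xs.length : Int) - k) - max 0 (q - k + 1) + 1))) d)
            (hasFold xs))
      else hasFold xs).items := rfl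

theorem step_if_eq (d : PySem.Dict String Int) (K : String) :
    (if d.contains K then d.insert K (d.getD K 0 + 1) else d.insert K 1)
      = d.insert K (d.getD K 0 + 1) := by
  by_cases h : d.contains K = true
  · rw [if_pos h]
  · rw [if_neg h, PySem.Dict.getD_of_not_contains d 0 (by simpa using h), zero_add]

theorem A_fold_norm (xs : List String) (k : Int) (hk2 : 2 ≤ k) (hkn2 : k ≤ (xs.length : Int))
    (d : PySem.Dict String Int) :
    (PySem.List.pyRange 0 ((xs.length : Int) - k + 1) 1).foldl (fun d i =>
        (PySem.List.combinations (PySem.List.slice xs (some i) (some (i + k))) 2).foldl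
          (fun d co =>
            if d.contains ("token_pair=" ++ PySem.List.pyGetD co 0 "" ++ "__" ++ PySem.List.pyGetD co 1 "") then
              d.insert ("token_pair=" ++ PySem.List.pyGetD co 0 "" ++ "__" ++ PySem.List.pyGetD co 1 "")
                (d.getD ("token_pair=" ++ PySem.List.pyGetD co 0 "" ++ "__" ++ PySem.List.pyGetD co 1 "") 0 + 1)
            else
              d.insert ("token_pair=" ++ PySem.List.pyGetD co 0 "" ++ "__" ++ PySem.List.pyGetD co 1 "") 1) d) d
      = (PAs (xs.length : Int) k).foldl
          (fun d pq => d.insert (keyPI xs pq) (d.getD (keyPI xs pq) 0 + 1)) d := by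
  rw [PAs, ← foldl_foldl_flatMap]
  apply PySem.List.foldl_congr_mem
  intro acc i hi
  rw [PySem.List.mem_pyRange_one] at hi
  rw [slice_eq_map_pyRange xs i k (by omega) (by omega) (by omega),
    PySem.List.combinations_map, combinations_two, List.map_map, List.foldl_map]
  apply PySem.List.foldl_congr_mem
  intro acc2 pq _
  simp only [Function.comp, List.map_cons, List.map_nil, PySem.List.pyGetD_zero_cons, keyPI, tokI]
  rw [show ∀ (x y : String), PySem.List.pyGetD [x, y] 1 "" = y from fun x y => rfl]
  exact step_if_eq acc2 _

theorem B1_fold_norm (xs : List String) (k : Int) (d : PySem.Dict String Int) :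
    (PySem.List.pyRange 0 (k - 1) 1).foldl (fun d p =>
        (PySem.List.pyRange (p + 1) k 1).foldl (fun d q =>
          d.insert ("token_pair=" ++ PySem.List.pyGetD xs p "" ++ "__" ++ PySem.List.pyGetD xs q "")
            (d.getD ("token_pair=" ++ PySem.List.pyGetD xs p "" ++ "__" ++ PySem.List.pyGetD xs q "") 0
              + (min p ((xs.length : Int) - k) - max 0 (q - k + 1) + 1))) d) d
      = (pairs2 (PySem.List.pyRange 0 k 1)).foldl
          (fun d pq => d.insert (keyPI xs pq)
            (d.getD (keyPI xs pq) 0 + mvalI (xs.length : Int) k pq)) d := by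
  rw [← flat_pairs k 0, ← foldl_foldl_flatMap]
  apply PySem.List.foldl_congr_mem
  intro acc p _
  rw [List.foldl_map]
  apply PySem.List.foldl_congr_mem
  intro acc2 q _
  simp only [keyPI, tokI, mvalI]

theorem B2_fold_norm (xs : List String) (k : Int) (d : PySem.Dict String Int) :
    (PySem.List.pyRange 1 ((xs.length : Int) - k + 1) 1).foldl (fun d i =>
        (PySem.List.pyRange i (i + k - 1) 1).foldl (fun d p =>
          d.insert ("token_pair=" ++ PySem.List.pyGetD xs p "" ++ "__" ++ PySem.List.pyGetD xs (i + k - 1) "")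
            (d.getD ("token_pair=" ++ PySem.List.pyGetD xs p "" ++ "__" ++ PySem.List.pyGetD xs (i + k - 1) "") 0
              + (min p ((xs.length : Int) - k) - max 0 ((i + k - 1) - k + 1) + 1))) d) d
      = ((PySem.List.pyRange 1 ((xs.length : Int) - k + 1) 1).flatMap
          (fun i => (PySem.List.pyRange i (i + k - 1) 1).map (fun p => (p, i + k - 1)))).foldl
          (fun d pq => d.insert (keyPI xs pq)
            (d.getD (keyPI xs pq) 0 + mvalI (xs.length : Int) k pq)) d := by
  rw [← foldl_foldl_flatMap]
  apply PySem.List.foldl_congr_mem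
  intro acc i _
  rw [List.foldl_map]
  apply PySem.List.foldl_congr_mem
  intro acc2 p _
  simp only [keyPI, tokI, mvalI]

theorem hasFold_keys_nodup (xs : List String) : (hasFold xs).keys.Nodup := by
  rw [hasFold]
  exact PySem.Dict.nodup_keys_foldl_insert_key xs (fun token => "has(" ++ token ++ ")")
    (fun _ token => (PySem.Dict.counter xs).getD token 0) PySem.Dict.empty
    (by rw [PySem.Dict.keys_empty]; exact List.nodup_nil)

theorem main_case (xs : List String) (k : Int) (hk2 : 2 ≤ k) (hkn : k ≤ (xs.length : Int)) :
    token_feature xs k = token_feature_alt xs k := by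
  rw [token_feature_eq, token_feature_alt_eq, if_pos ⟨hk2, hkn⟩]
  rw [A_fold_norm xs k hk2 hkn, B1_fold_norm, B2_fold_norm]
  rw [show ∀ (d : PySem.Dict String Int),
      ((PySem.List.pyRange 1 ((xs.length : Int) - k + 1) 1).flatMap
          (fun i => (PySem.List.pyRange i (i + k - 1) 1).map (fun p => (p, i + k - 1)))).foldl
        (fun d pq => d.insert (keyPI xs pq)
          (d.getD (keyPI xs pq) 0 + mvalI (xs.length : Int) k pq))
        ((pairs2 (PySem.List.pyRange 0 k 1)).foldl
          (fun d pq => d.insert (keyPI xs pq)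
            (d.getD (keyPI xs pq) 0 + mvalI (xs.length : Int) k pq)) d)
      = (SBs (xs.length : Int) k).foldl
          (fun d pq => d.insert (keyPI xs pq)
            (d.getD (keyPI xs pq) 0 + mvalI (xs.length : Int) k pq)) d
    from fun d => by rw [SBs, List.foldl_append]]
  -- both sides are now weighted-counter folds over PAs and SBs from the same dict
  set n : Int := (xs.length : Int) with hn
  have hP1 : PySem.Set.ofList (PAs n k) = SBs n k := by
    have hj : (n - k + 1) = 1 + (((n - k).toNat : Nat) : Int) := by omega
    rw [PAs, SBs, hj]
    exact ofList_windows k hk2 (n - k).toNat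
  have hSBnodup : (SBs n k).Nodup := by
    rw [← hP1]; exact PySem.Set.nodup_ofList _
  have hmemPA : ∀ pq, pq ∈ PAs n k ↔ pq ∈ SBs n k := by
    intro pq
    rw [← hP1, PySem.Set.mem_ofList]
  have hA := PySem.Dict.keys_foldl_insert_key (PAs n k) (keyPI xs)
    (fun d pq => d.getD (keyPI xs pq) 0 + 1) (hasFold xs)
  have hB := PySem.Dict.keys_foldl_insert_key (SBs n k) (keyPI xs)
    (fun d pq => d.getD (keyPI xs pq) 0 + mvalI n k pq) (hasFold xs)
  have hkeys : ((PAs n k).foldl (fun d pq => d.insert (keyPI xs pq) (d.getD (keyPI xs pq) 0 + 1))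
        (hasFold xs)).keys
      = ((SBs n k).foldl (fun d pq => d.insert (keyPI xs pq)
          (d.getD (keyPI xs pq) 0 + mvalI n k pq)) (hasFold xs)).keys := by
    rw [hA, hB, PySem.Set.update_eq_append_filter, PySem.Set.update_eq_append_filter]
    rw [ofList_map_ofList, hP1, ofList_map_ofList (SBs n k),
      PySem.Set.ofList_eq_self_of_nodup _ hSBnodup]
  have hval : ∀ v, ((PAs n k).foldl (fun d pq => d.insert (keyPI xs pq)
          (d.getD (keyPI xs pq) 0 + 1)) (hasFold xs)).getD v 0
      = ((SBs n k).foldl (fun d pq => d.insert (keyPI xs pq)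
          (d.getD (keyPI xs pq) 0 + mvalI n k pq)) (hasFold xs)).getD v 0 := by
    intro v
    rw [getD_wfold (PAs n k) (keyPI xs) (fun _ => 1) (hasFold xs) v,
      getD_wfold (SBs n k) (keyPI xs) (mvalI n k) (hasFold xs) v]
    congr 1
    set p : Int × Int → Bool := fun pq => decide (keyPI xs pq = v) with hp
    have hconst : (((PAs n k).filter p).map (fun _ => (1 : Int))).sum
        = (((PAs n k).countP p : Nat) : Int) := by
      rw [PySem.List.sum_map_const_int, List.countP_eq_length_filter]
      ring
    rw [hconst, countP_eq_sum_counts (PAs n k) (SBs n k) p hSBnodup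
      (fun x hx => (hmemPA x).1 hx), cast_sum_nat, List.map_map]
    congr 1
    apply List.map_congr_left
    intro pq hpq
    have hmem : pq ∈ SBs n k := List.mem_of_mem_filter hpq
    simp only [Function.comp]
    exact count_PAs n k hk2 hkn pq ((hmemPA pq).2 hmem)
  have hAnodup := PySem.Dict.nodup_keys_foldl_insert_key (PAs n k) (keyPI xs)
    (fun d pq => d.getD (keyPI xs pq) 0 + 1) (hasFold xs) (hasFold_keys_nodup xs)
  have hBnodup := PySem.Dict.nodup_keys_foldl_insert_key (SBs n k) (keyPI xs)
    (fun d pq => d.getD (keyPI xs pq) 0 + mvalI n k pq) (hasFold xs) (hasFold_keys_nodup xs)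
  rw [PySem.Dict.items_eq_map_keys _ hAnodup 0, PySem.Dict.items_eq_map_keys _ hBnodup 0, hkeys]
  apply List.map_congr_left
  intro v _
  rw [hval v]

theorem window_short (xs : List String) (k i : Int) (hk : k ≤ 1) (h0 : 0 ≤ i)
    (hD : ¬(k < 0 ∧ 2 ≤ (xs.length : Int) + k)) :
    (PySem.List.slice xs (some i) (some (i + k))).length < 2 := by
  rw [PySem.List.length_slice]
  have hci : PySem.List.clampIdx xs.length i = min i.toNat xs.length := by
    rw [show i = ((i.toNat : Nat) : Int) by omega, PySem.List.clampIdx_natCast]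
    omega
  by_cases hik : 0 ≤ i + k
  · have hcik : PySem.List.clampIdx xs.length (i + k) = min (i + k).toNat xs.length := by
      rw [show i + k = (((i + k).toNat : Nat) : Int) by omega, PySem.List.clampIdx_natCast]
      omega
    rw [hci, hcik]
    omega
  · have hpos : 0 < (-(i + k)).toNat := by omega
    have hcik : PySem.List.clampIdx xs.length (i + k) = xs.length - (-(i + k)).toNat := by
      rw [show i + k = -((((-(i + k)).toNat : Nat)) : Int) by omega,
        PySem.List.clampIdx_neg_natCast _ _ hpos]
      omega
    rw [hci, hcik]
    omega

theorem degenerate_case (xs : List String) (k : Int)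
    (h : ¬(2 ≤ k ∧ k ≤ (xs.length : Int)))
    (hD : ¬(k < 0 ∧ 2 ≤ (xs.length : Int) + k)) :
    token_feature xs k = token_feature_alt xs k := by
  rw [token_feature_eq, token_feature_alt_eq, if_neg h]
  congr 1
  by_cases hkn : (xs.length : Int) - k + 1 ≤ 0
  · rw [PySem.List.pyRange_one_eq_nil (by omega)]
    rfl
  · have hk1 : k ≤ 1 := by
      by_contra hgt
      exact h ⟨by omega, by omega⟩
    rw [PySem.List.foldl_congr_mem _ _ (fun d _ => d) _ (by
      intro acc i hi
      rw [PySem.List.mem_pyRange_one] at hi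
      rw [PySem.List.combinations_eq_nil_of_length_lt _
        (window_short xs k i hk1 (by omega) hD)]
      rfl)]
    exact PySem.List.foldl_ignore _ _

theorem pairKey_ne_hasKey (a b t : String) :
    ("token_pair=" ++ a ++ "__" ++ b) ≠ ("has(" ++ t ++ ")") := by
  intro h
  have h2 := congrArg String.toList h
  simp [String.toList_append] at h2

theorem hasFold_keys_form (xs : List String) (v : String) (hv : v ∈ (hasFold xs).keys) :
    ∃ t, v = "has(" ++ t ++ ")" := by
  rw [hasFold, PySem.Dict.keys_foldl_insert_key xs (fun token => "has(" ++ token ++ ")")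
    (fun _ token => (PySem.Dict.counter xs).getD token 0) PySem.Dict.empty,
    PySem.Dict.keys_empty] at hv
  rw [PySem.Set.update_nil_left, PySem.Set.mem_ofList] at hv
  obtain ⟨t, _, ht⟩ := List.mem_map.1 hv
  exact ⟨t, ht.symm⟩

-- ===== VERDICT (by name: the statement is the Claim_ definition above) =====
theorem token_feature_spec : Claim_unchanged_token_feature := by
  intro xs k _hdom hD
  by_cases hmain : 2 ≤ k ∧ k ≤ (xs.length : Int)
  · exact main_case xs k hmain.1 hmain.2
  · exact degenerate_case xs k hmain (by unfold D_token_feature at hD; exact hD)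
theorem token_feature_changed : Claim_changed_token_feature := by
  unfold Claim_changed_token_feature; decide
theorem token_feature_tight : Claim_exact_token_feature := by
  intro xs k _hdom hD
  unfold D_token_feature at hD
  obtain ⟨hkneg, hnk⟩ := hD
  set n : Int := (xs.length : Int) with hn
  rw [token_feature_eq, token_feature_alt_eq, if_neg (by omega)]
  -- A's pair loop really inserts a token_pair key; B returns only has(...) keys
  intro heq
  -- collapse A's if-step
  rw [PySem.List.foldl_congr_mem _ _ (fun d i =>
      (PySem.List.combinations (PySem.List.slice xs (some i) (some (i + k))) 2).foldl
        (fun d co =>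
          d.insert ("token_pair=" ++ PySem.List.pyGetD co 0 "" ++ "__" ++ PySem.List.pyGetD co 1 "")
            (d.getD ("token_pair=" ++ PySem.List.pyGetD co 0 "" ++ "__" ++ PySem.List.pyGetD co 1 "") 0 + 1)) d)
      _ (by
        intro acc i _
        apply PySem.List.foldl_congr_mem
        intro acc2 co _
        exact step_if_eq acc2 _), foldl_foldl_flatMap] at heq
  have hkeys := congrArg (fun l => List.map Prod.fst l) heq
  simp only [] at hkeys
  rw [← PySem.Dict.keys, ← PySem.Dict.keys] at hkeys
  rw [PySem.Dict.keys_foldl_insert_key _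
    (fun co => "token_pair=" ++ PySem.List.pyGetD co 0 "" ++ "__" ++ PySem.List.pyGetD co 1 "")
    (fun d co => d.getD ("token_pair=" ++ PySem.List.pyGetD co 0 "" ++ "__" ++ PySem.List.pyGetD co 1 "") 0 + 1)
    (hasFold xs)] at hkeys
  -- the witness pair from window 0
  set a0 : List String := PySem.List.slice xs (some 0) (some (0 + k)) with ha0
  have hlen : 2 ≤ a0.length := by
    rw [ha0, PySem.List.length_slice]
    have hc0 : PySem.List.clampIdx xs.length 0 = 0 := by
      rw [show (0 : Int) = ((0 : Nat) : Int) by norm_num, PySem.List.clampIdx_natCast]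
      omega
    have hpos : 0 < (-(0 + k)).toNat := by omega
    have hck : PySem.List.clampIdx xs.length (0 + k) = xs.length - (-(0 + k)).toNat := by
      rw [show 0 + k = -((((-(0 + k)).toNat : Nat)) : Int) by omega,
        PySem.List.clampIdx_neg_natCast _ _ hpos]
      omega
    rw [hc0, hck]
    omega
  have hco : a0.take 2 ∈ PySem.List.combinations a0 2 := by
    rw [PySem.List.mem_combinations_iff]
    exact ⟨List.take_sublist 2 a0, by rw [List.length_take]; omega⟩
  have hzero : (0 : Int) ∈ PySem.List.pyRange 0 (n - k + 1) 1 := by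
    rw [PySem.List.mem_pyRange_one]; omega
  have hmemCO : a0.take 2 ∈ (PySem.List.pyRange 0 (n - k + 1) 1).flatMap
      (fun i => PySem.List.combinations (PySem.List.slice xs (some i) (some (i + k))) 2) := by
    rw [List.mem_flatMap]
    exact ⟨0, hzero, hco⟩
  have hkA : ("token_pair=" ++ PySem.List.pyGetD (a0.take 2) 0 "" ++ "__" ++ PySem.List.pyGetD (a0.take 2) 1 "")
      ∈ PySem.Set.update (hasFold xs).keys
        (((PySem.List.pyRange 0 (n - k + 1) 1).flatMap
          (fun i => PySem.List.combinations (PySem.List.slice xs (some i) (some (i + k))) 2)).map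
          (fun co => "token_pair=" ++ PySem.List.pyGetD co 0 "" ++ "__" ++ PySem.List.pyGetD co 1 "")) := by
    rw [PySem.Set.mem_update]
    exact Or.inr (List.mem_map_of_mem hmemCO)
  rw [hkeys] at hkA
  obtain ⟨t, ht⟩ := hasFold_keys_form xs _ hkA
  exact pairKey_ne_hasKey _ _ t ht
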